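-- pv_equiv track=rewrite | github.com/Mohican999370/Learning.Python | Code.Forces/P0139A_Petr_and_Book.py | find_last_day
-- ===== SOURCE A (Python) =====
-- def find_last_day(n_page: int, reading_schedule: list) -> int:
--     sum_schedule = sum(reading_schedule)
--     n_page %= sum_schedule
--
--     if n_page % sum_schedule == 0:
--         i = 6
--
--         while reading_schedule[i] == 0:
--             i -= 1
--
--         return i + 1
--     else:
--         for i in range(7):
--             if n_page <= reading_schedule[i]:
--                 return i + 1
--             else:
--                 n_page -= reading_schedule[i]
--
--     return 0
-- ===== SOURCE B (Python) =====
-- def find_last_day(n_page: int, reading_schedule: list) -> int: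
--     total = sum(reading_schedule)
--     r = n_page % total
--     week = reading_schedule[:7]
--     # stage 1: build a prefix-sum table for the week
--     prefix = []
--     acc = 0
--     for v in week:
--         acc += v
--         prefix.append(acc)
--     day = 0
--     if r == 0:
--         # exact multiple: the last weekday with a nonzero quota (keep-last forward fold)
--         for i, v in enumerate(week):
--             if v != 0:
--                 day = i + 1
--     else:
--         # earliest day whose prefix sum reaches r: backward sweep keeping the smallest hit
--         for i, p in reversed(list(enumerate(prefix))):
--             if p >= r:
--                 day = i + 1
--     return day
-- ===== Notes on version B (the rewrite author's own statement) =====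
-- stated objective: alternative
-- what changed: B replaces A's destructive subtract-as-you-go forward loop and backward while-scan with two staged passes: it first materialises a prefix-sum table of the week, then selects the day by a fold over (index,value) pairs -- a forward keep-last fold over the schedule for the exact-multiple case, and a reversed sweep over the prefix table keeping the smallest qualifying index otherwise.
-- outside the precondition, e.g. on find_last_day(2, [0, 0, 0, 0, 0, 0, 0, 2, 0]): A returns -1, B returns 0
import Mathlib
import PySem

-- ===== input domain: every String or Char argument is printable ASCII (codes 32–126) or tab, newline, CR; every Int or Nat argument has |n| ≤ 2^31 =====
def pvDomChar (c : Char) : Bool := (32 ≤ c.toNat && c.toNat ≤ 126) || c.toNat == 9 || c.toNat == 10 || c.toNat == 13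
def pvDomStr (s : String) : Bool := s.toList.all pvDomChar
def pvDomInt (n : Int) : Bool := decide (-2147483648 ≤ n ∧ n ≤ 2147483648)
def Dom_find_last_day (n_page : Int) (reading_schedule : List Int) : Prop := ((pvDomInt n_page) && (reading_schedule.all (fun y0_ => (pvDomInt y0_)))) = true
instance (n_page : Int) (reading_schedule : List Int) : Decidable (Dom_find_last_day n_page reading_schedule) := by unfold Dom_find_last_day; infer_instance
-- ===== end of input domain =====

-- B replaces A's destructive subtract loop and backward while-scan by two staged passes:
-- a prefix-sum table, then a fold over (index,value) pairs selecting the day (objective: alternative).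

-- ===== PORT A =====

-- the 'while reading_schedule[i] == 0: i -= 1' scan; fuel bounds the steps until
-- Python's IndexError (i below -len); pyGet? none / fuel 0 are that error (outside Pre_)
def fldA_back (s : List Int) : Int → Nat → Int
  | _, 0 => 0
  | i, fuel+1 =>
    match PySem.List.pyGet? s i with
    | none => 0
    | some v => if v = 0 then fldA_back s (i-1) fuel else i + 1

-- the 'for i in range(7)' loop; pyGet? none = IndexError (outside Pre_)
def fldA_fwd (s : List Int) (n : Int) (i : Nat) : Int :=
  if _h : i < 7 then
    match PySem.List.pyGet? s (i : Int) with
    | none => 0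
    | some v => if n ≤ v then (i : Int) + 1 else fldA_fwd s (n - v) (i+1)
  else 0
termination_by 7 - i

def find_last_day (n_page : Int) (reading_schedule : List Int) : Int :=
  let sum_schedule := reading_schedule.sum
  if sum_schedule = 0 then 0   -- ZeroDivisionError (outside Pre_)
  else
    let n := PySem.Int.mod n_page sum_schedule
    if PySem.Int.mod n sum_schedule = 0 then
      fldA_back reading_schedule 6 (7 + reading_schedule.length)
    else
      fldA_fwd reading_schedule n 0

-- ===== PORT B =====

-- 'for v in week: acc += v; prefix.append(acc)'
def fldB_prefix : List Int → Int → List Int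
  | [], _ => []
  | v :: rest, acc => (acc + v) :: fldB_prefix rest (acc + v)

def find_last_day_alt (n_page : Int) (reading_schedule : List Int) : Int :=
  let total := reading_schedule.sum
  if total = 0 then 0   -- ZeroDivisionError (outside Pre_)
  else
    let r := PySem.Int.mod n_page total
    let week := PySem.List.slice reading_schedule none (some 7)
    let pfx := fldB_prefix week 0
    if r = 0 then
      -- for i, v in enumerate(week): if v != 0: day = i + 1
      (PySem.List.enumerate week 0).foldl
        (fun day iv => if iv.2 ≠ 0 then iv.1 + 1 else day) 0
    else
      -- for i, p in reversed(list(enumerate(prefix))): if p >= r: day = i + 1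
      ((PySem.List.enumerate pfx 0).reverse).foldl
        (fun day ip => if r ≤ ip.2 then ip.1 + 1 else day) 0

-- ===== PRECONDITION & SPEC =====
-- Pre_ excludes inputs where A raises (ZeroDivisionError when the sum is 0; IndexError when
-- the list is shorter than 7 and the day loop does not return early) and the accidental
-- negative-index-wraparound corner where n_page is an exact multiple of the sum but the first
-- seven entries are all zero: there A's backward scan wraps to the end of the list and returns
-- a wrapped value, while B returns the last nonzero day of the week (0 when there is none).
def Pre_find_last_day (n_page : Int) (reading_schedule : List Int) : Prop :=
  reading_schedule.sum ≠ 0 ∧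
  ((7 ≤ reading_schedule.length ∧
      (PySem.Int.mod n_page reading_schedule.sum = 0 →
        (reading_schedule.take 7).any (fun x => x ≠ 0))) ∨
   (PySem.Int.mod n_page reading_schedule.sum ≠ 0 ∧
      ∃ k < min 7 reading_schedule.length,
        PySem.Int.mod n_page reading_schedule.sum ≤ (reading_schedule.take (k+1)).sum))

instance (n_page : Int) (reading_schedule : List Int) : Decidable (Pre_find_last_day n_page reading_schedule) := by
  unfold Pre_find_last_day; infer_instance

def pvWitness_find_last_day : Int × List Int := (5, [1, 2, 3, 4, 5, 6, 7])

def Spec_find_last_day (n_page : Int) (reading_schedule : List Int) (out : Int) : Prop := out = find_last_day_alt n_page reading_schedule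
instance (n_page : Int) (reading_schedule : List Int) (out : Int) : Decidable (Spec_find_last_day n_page reading_schedule out) := by unfold Spec_find_last_day; infer_instance

-- ===== CLAIM (what is proved, stated in full; the proofs are below) =====
def Claim_equal_find_last_day : Prop := ∀ (n_page : Int) (reading_schedule : List Int), Dom_find_last_day n_page reading_schedule → Pre_find_last_day n_page reading_schedule → Spec_find_last_day n_page reading_schedule (find_last_day n_page reading_schedule)

-- ===== LEMMAS AND PROOFS =====

-- Python's % is idempotent: r = n % t lies strictly between -|t| and |t|, so r % t = 0 ↔ r = 0
lemma mod_mod_eq_zero_iff (n t : Int) (ht : t ≠ 0) :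
    PySem.Int.mod (PySem.Int.mod n t) t = 0 ↔ PySem.Int.mod n t = 0 := by
  constructor
  · intro h
    have hd := (PySem.Int.mod_eq_zero_iff_dvd _ _).mp h
    rcases lt_or_gt_of_ne ht with hneg | hpos
    · have hb := PySem.Int.mod_neg_bounds (a := n) hneg
      exact Int.eq_zero_of_dvd_of_natAbs_lt_natAbs hd (by omega)
    · have h1 := PySem.Int.mod_nonneg (a := n) hpos
      have h2 := PySem.Int.mod_lt (a := n) hpos
      exact Int.eq_zero_of_dvd_of_natAbs_lt_natAbs hd (by omega)
  · intro h; rw [h]; simp [PySem.Int.mod]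

-- one step of the backward while-scan
lemma back_succ (s : List Int) (i : Int) (F : Nat) :
    fldA_back s i (F+1) =
      match PySem.List.pyGet? s i with
      | none => 0
      | some v => if v = 0 then fldA_back s (i-1) F else i + 1 := rfl

-- proof-side reference recursion: the first day whose running prefix sum reaches r
def fldB_scan (r : Int) : List Int → Nat → Int → Int
  | [], _, _ => 0
  | v :: rest, i, acc =>
    if acc + v ≥ r then (i : Int) + 1 else fldB_scan r rest (i+1) (acc + v)

-- A's forward day loop computes the first-hit scan
lemma fwd_eq (s : List Int) (r : Int) : ∀ (m i : Nat), i + m = 7 →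
    fldA_fwd s (r - (s.take i).sum) i = fldB_scan r ((s.take 7).drop i) i (s.take i).sum := by
  intro m
  induction m with
  | zero =>
    intro i hi
    have h7 : i = 7 := by omega
    subst h7
    rw [fldA_fwd]
    simp [fldB_scan]
  | succ m ih =>
    intro i hi
    have hilt : i < 7 := by omega
    rw [fldA_fwd, dif_pos hilt]
    by_cases hlen : i < s.length
    · have hget : PySem.List.pyGet? s (i : Int) = some s[i] := by
        simp [List.getElem?_eq_getElem hlen]
      rw [hget]
      have hti : i < (s.take 7).length := by simp; omega
      have hdrop : (s.take 7).drop i = (s.take 7)[i] :: (s.take 7).drop (i+1) :=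
        List.drop_eq_getElem_cons hti
      have hgi : (s.take 7)[i] = s[i] := List.getElem_take
      rw [hdrop, hgi, fldB_scan]
      dsimp only
      have hsum : (s.take (i+1)).sum = (s.take i).sum + s[i] := List.sum_take_succ s i hlen
      by_cases hc : r - (s.take i).sum ≤ s[i]
      · rw [if_pos hc, if_pos (by omega)]
      · rw [if_neg hc, if_neg (by omega)]
        have h2 := ih (i+1) (by omega)
        rw [hsum] at h2
        rw [show r - (List.take i s).sum - s[i] = r - ((List.take i s).sum + s[i]) from by ring]
        exact h2
    · have hget : PySem.List.pyGet? s (i : Int) = none := by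
        simp only [PySem.List.pyGet?_natCast, List.getElem?_eq_none_iff]; omega
      rw [hget]
      have : (s.take 7).drop i = [] := by
        apply List.drop_eq_nil_of_le; simp; omega
      rw [this, fldB_scan]

-- B's reversed sweep over the prefix table also computes the first-hit scan
lemma back_eq_scan (r : Int) : ∀ (w : List Int) (i : Nat) (acc : Int),
    ((PySem.List.enumerate (fldB_prefix w acc) (i : Int)).reverse).foldl
      (fun day ip => if r ≤ ip.2 then ip.1 + 1 else day) 0 = fldB_scan r w i acc := by
  intro w
  induction w with
  | nil => intro i acc; simp [fldB_prefix, fldB_scan, PySem.List.enumerate_nil]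
  | cons v rest ih =>
    intro i acc
    rw [show fldB_prefix (v :: rest) acc = (acc + v) :: fldB_prefix rest (acc + v) from rfl,
        PySem.List.enumerate_cons, List.foldl_reverse, List.foldr_cons, ← List.foldl_reverse]
    have hcast : ((i : Int) + 1) = ((i + 1 : Nat) : Int) := by push_cast; ring
    rw [hcast, ih (i+1) (acc+v), fldB_scan]
    dsimp only
    by_cases h : r ≤ acc + v
    · rw [if_pos h, if_pos (by omega)]; omega
    · rw [if_neg h, if_neg (by omega)]

-- ===== VERDICT (by name: the statement is the Claim_ definition above) =====
theorem find_last_day_spec : Claim_equal_find_last_day := by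
  intro n s _hdom hpre
  obtain ⟨ht, hcase⟩ := hpre
  unfold Spec_find_last_day find_last_day find_last_day_alt
  simp only [if_neg ht]
  simp only [mod_mod_eq_zero_iff n s.sum ht]
  have hslice : PySem.List.slice s none (some 7) = s.take 7 := by
    have h7 := PySem.List.slice_to_natCast (xs := s) (b := 7)
    simpa using h7
  by_cases hr : PySem.Int.mod n s.sum = 0
  · -- exact-multiple case
    simp only [if_pos hr, hslice]
    have hany : ((s.take 7).any (fun x => x ≠ 0) : Bool) := by
      rcases hcase with ⟨_, h⟩ | ⟨hne, _⟩
      · exact h hr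
      · exact absurd hr hne
    have hlen : 7 ≤ s.length := by
      rcases hcase with ⟨h, _⟩ | ⟨hne, _⟩
      · exact h
      · exact absurd hr hne
    rcases s with _ | ⟨a, _ | ⟨b, _ | ⟨c, _ | ⟨d, _ | ⟨e, _ | ⟨f, _ | ⟨g, rest⟩⟩⟩⟩⟩⟩⟩ <;>
      simp only [List.length_cons, List.length_nil] at hlen <;> try omega
    -- s = a::b::c::d::e::f::g::rest
    have G0 : PySem.List.pyGet? (a::b::c::d::e::f::g::rest) 0 = some a := by
      simp only [PySem.List.pyGet?, PySem.List.pyIdx?, List.length_cons]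
      split
      · split
        · simp
        · omega
      · omega
    have G1 : PySem.List.pyGet? (a::b::c::d::e::f::g::rest) 1 = some b := by
      simp only [PySem.List.pyGet?, PySem.List.pyIdx?, List.length_cons]
      split
      · split
        · simp
        · omega
      · omega
    have G2 : PySem.List.pyGet? (a::b::c::d::e::f::g::rest) 2 = some c := by
      simp only [PySem.List.pyGet?, PySem.List.pyIdx?, List.length_cons]
      split
      · split
        · simp
        · omega
      · omega
    have G3 : PySem.List.pyGet? (a::b::c::d::e::f::g::rest) 3 = some d := by
      simp only [PySem.List.pyGet?, PySem.List.pyIdx?, List.length_cons]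
      split
      · split
        · simp
        · omega
      · omega
    have G4 : PySem.List.pyGet? (a::b::c::d::e::f::g::rest) 4 = some e := by
      simp only [PySem.List.pyGet?, PySem.List.pyIdx?, List.length_cons]
      split
      · split
        · simp
        · omega
      · omega
    have G5 : PySem.List.pyGet? (a::b::c::d::e::f::g::rest) 5 = some f := by
      simp only [PySem.List.pyGet?, PySem.List.pyIdx?, List.length_cons]
      split
      · split
        · simp
        · omega
      · omega
    have G6 : PySem.List.pyGet? (a::b::c::d::e::f::g::rest) 6 = some g := by
      simp only [PySem.List.pyGet?, PySem.List.pyIdx?, List.length_cons]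
      split
      · split
        · simp
        · omega
      · omega
    simp only [List.take_succ_cons, List.take_zero, List.any_cons, List.any_nil,
      Bool.or_false, decide_eq_true_eq, Bool.or_eq_true] at hany
    have hB : (PySem.List.enumerate (List.take 7 (a::b::c::d::e::f::g::rest)) 0).foldl
        (fun day iv => if iv.2 ≠ 0 then iv.1 + 1 else day) 0 =
        (if g ≠ 0 then (7:Int) else if f ≠ 0 then 6 else if e ≠ 0 then 5 else
         if d ≠ 0 then 4 else if c ≠ 0 then 3 else if b ≠ 0 then 2 else
         if a ≠ 0 then 1 else 0) := by
      simp only [List.take_succ_cons, List.take_zero, PySem.List.enumerate_cons,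
        PySem.List.enumerate_nil, List.foldl]
      norm_num
    rw [hB, show (7 + (a::b::c::d::e::f::g::rest).length : Nat) = rest.length + 14 from by
      simp; omega]
    rw [show (rest.length + 14 : Nat) = (rest.length + 13) + 1 from by omega, back_succ, G6]
    dsimp only
    by_cases hg : g = 0
    case neg =>
      rw [if_neg hg, if_pos hg] <;> norm_num
    case pos =>
    rw [if_pos hg, if_neg (by simp [hg]), show ((6:Int) - 1 : Int) = 5 from by norm_num]
    rw [show (rest.length + 13 : Nat) = (rest.length + 12) + 1 from by omega, back_succ, G5]
    dsimp only
    by_cases hf : f = 0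
    case neg =>
      rw [if_neg hf, if_pos hf] <;> norm_num
    case pos =>
    rw [if_pos hf, if_neg (by simp [hf]), show ((5:Int) - 1 : Int) = 4 from by norm_num]
    rw [show (rest.length + 12 : Nat) = (rest.length + 11) + 1 from by omega, back_succ, G4]
    dsimp only
    by_cases he : e = 0
    case neg =>
      rw [if_neg he, if_pos he] <;> norm_num
    case pos =>
    rw [if_pos he, if_neg (by simp [he]), show ((4:Int) - 1 : Int) = 3 from by norm_num]
    rw [show (rest.length + 11 : Nat) = (rest.length + 10) + 1 from by omega, back_succ, G3]
    dsimp only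
    by_cases hd : d = 0
    case neg =>
      rw [if_neg hd, if_pos hd] <;> norm_num
    case pos =>
    rw [if_pos hd, if_neg (by simp [hd]), show ((3:Int) - 1 : Int) = 2 from by norm_num]
    rw [show (rest.length + 10 : Nat) = (rest.length + 9) + 1 from by omega, back_succ, G2]
    dsimp only
    by_cases hc : c = 0
    case neg =>
      rw [if_neg hc, if_pos hc] <;> norm_num
    case pos =>
    rw [if_pos hc, if_neg (by simp [hc]), show ((2:Int) - 1 : Int) = 1 from by norm_num]
    rw [show (rest.length + 9 : Nat) = (rest.length + 8) + 1 from by omega, back_succ, G1]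
    dsimp only
    by_cases hb : b = 0
    case neg =>
      rw [if_neg hb, if_pos hb] <;> norm_num
    case pos =>
    rw [if_pos hb, if_neg (by simp [hb]), show ((1:Int) - 1 : Int) = 0 from by norm_num]
    rw [show (rest.length + 8 : Nat) = (rest.length + 7) + 1 from by omega, back_succ, G0]
    dsimp only
    by_cases ha : a = 0
    case neg =>
      rw [if_neg ha, if_pos ha] <;> norm_num
    case pos =>
    rw [if_pos ha, if_neg (by simp [ha])]
    -- all of the first seven entries are zero: excluded by Pre_
    simp only [ha, hb, hc, hd, he, hf, hg, ne_eq, not_true_eq_false, or_self] at hany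
  · simp only [if_neg hr, hslice]
    have hscan := back_eq_scan (PySem.Int.mod n s.sum) (s.take 7) 0 0
    simp only [Nat.cast_zero] at hscan
    rw [hscan]
    have h0 := fwd_eq s (PySem.Int.mod n s.sum) 7 0 rfl
    simpa using h0
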